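-- pv_equiv track=rewrite | github.com/JankoStrizak/Weekly-coding-questions | append_sort/append_sort.py | append_sort
-- ===== SOURCE A (Python) =====
-- def num_length(num):
--     count = 1
--     while(num >= 10):
--         num = num//10
--         count += 1
--     return count
--
-- def get_first_n_dig(num, n):
--     while(num >= (10**n)):
--         num = num//10
--     return num
--
-- def get_new_val(prev,curr):
--
--     #get number of digits in each number
--     l_prev = num_length(prev)
--     l_curr = num_length(curr)
--
--     #first n digigts of prev, where n is the number of digits of curr
--     first_n_digits_prev = get_first_n_dig(prev, l_curr)
--
--     #the first digits of prev are less than curr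
--     if(first_n_digits_prev < curr):
--         num_new_digits = l_prev - l_curr
--         new_val = curr * (10**num_new_digits)
--
--     #the first digits of prev are equal to curr and are not followed by all 9s
--     elif(first_n_digits_prev == curr) \
--     and (get_first_n_dig(prev+1,l_curr) == first_n_digits_prev):
--         num_new_digits = l_prev - l_curr
--         new_val = prev+1
--
--     #the digits of prev are greater than curr
--     #or
--     #the digits of prev are equal to curr and are followed by all 9s
--     elif(first_n_digits_prev > curr) \
--     or ((get_first_n_dig(prev+1,l_curr) != first_n_digits_prev) \
--     and (first_n_digits_prev == curr)):
--         num_new_digits = l_prev - l_curr +1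
--         new_val = curr * (10**num_new_digits)
--
--     return new_val, num_new_digits
--
-- def append_sort(num_elements, arr):
--     num_new_digits = 0
--     for i in range(1, num_elements):
--         prev = arr[i-1]
--         curr = arr[i]
--         if (curr <= prev):
--             arr[i], num_new_digits_this_loop = get_new_val(prev, curr)
--             num_new_digits += num_new_digits_this_loop
--
--     return num_new_digits
-- ===== SOURCE B (Python) =====
-- def _digits(n):
--     # most-significant-first decimal digit list; any n < 10 (negatives included) is the single "digit" [n]
--     if n < 10:
--         return [n]
--     ds = []
--     while n >= 10:
--         n, r = divmod(n, 10)
--         ds.append(r)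
--     ds.append(n)
--     ds.reverse()
--     return ds
--
-- def _value(ds):
--     v = 0
--     for d in ds:
--         v = v * 10 + d
--     return v
--
-- def append_sort(num_elements, arr):
--     total = 0
--     for i in range(1, num_elements):
--         prev = arr[i - 1]
--         curr = arr[i]
--         if curr <= prev:
--             dp = _digits(prev)
--             dc = _digits(curr)
--             l = len(dc)
--             head = dp[:l]
--             tail = dp[l:]
--             if head < dc:
--                 arr[i] = _value(dc + [0] * len(tail))
--                 total += len(tail)
--             elif head == dc and any(d != 9 for d in tail):
--                 arr[i] = prev + 1
--                 total += len(tail)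
--             else:
--                 arr[i] = _value(dc + [0] * (len(tail) + 1))
--                 total += len(tail) + 1
--     return total
-- ===== Notes on version B (the rewrite author's own statement) =====
-- stated objective: alternative
-- what changed: B materialises each number's most-significant-first decimal digit LIST once (repeated divmod), then decides the pair by Python list operations - slicing the prefix, lexicographic list comparison against curr's digits, and an all-nines scan of the suffix instead of A's prefix-stability-under-(prev+1) re-extraction - and rebuilds the new value by folding the digit list; A instead repeatedly truncates the integers with division loops (num_length, get_first_n_dig on both prev and prev+1) and compares the extracted integer prefixes.
import Mathlib
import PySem

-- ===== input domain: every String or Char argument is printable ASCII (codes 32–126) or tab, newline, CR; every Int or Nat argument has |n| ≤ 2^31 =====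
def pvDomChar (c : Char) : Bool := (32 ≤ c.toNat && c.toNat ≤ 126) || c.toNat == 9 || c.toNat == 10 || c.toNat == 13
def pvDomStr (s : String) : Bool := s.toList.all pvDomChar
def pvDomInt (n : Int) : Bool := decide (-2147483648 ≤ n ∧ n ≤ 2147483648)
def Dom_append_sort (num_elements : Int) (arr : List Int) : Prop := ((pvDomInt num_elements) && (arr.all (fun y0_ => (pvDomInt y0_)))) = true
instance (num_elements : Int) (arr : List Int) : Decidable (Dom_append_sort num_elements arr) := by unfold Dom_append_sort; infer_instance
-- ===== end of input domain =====

-- B replaces A's integer-truncation machinery (num_length / get_first_n_dig division loops on prev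
-- and prev+1, comparing extracted integer prefixes) with an explicit decimal digit-LIST per number:
-- prefix slicing, lexicographic list comparison and an all-nines suffix scan; objective: alternative.
-- Both Pythons mutate arr in place identically: the equivalence proved here is about the return value.

-- ===== PORT A =====
-- A's while loops are ported with a fuel parameter that makes them structural; num // 10 shrinks
-- num each step, so num.toNat + 1 steps always suffice and the port is exact.
def num_length_loop (fuel : Nat) (num count : Int) : Int :=
  match fuel with
  | 0 => count
  | f + 1 =>
    if 10 ≤ num then num_length_loop f (PySem.Int.floordiv num 10) (count + 1) else count

def num_length (num : Int) : Int := num_length_loop (num.toNat + 1) num 1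

-- 10**n ported with n.toNat: A only calls this with n = num_length curr >= 1, where it is exact
def get_first_n_dig_loop (fuel : Nat) (num n : Int) : Int :=
  match fuel with
  | 0 => num
  | f + 1 =>
    if 10 ^ n.toNat ≤ num then get_first_n_dig_loop f (PySem.Int.floordiv num 10) n else num

def get_first_n_dig (num n : Int) : Int := get_first_n_dig_loop (num.toNat + 1) num n

-- 10**num_new_digits ported with .toNat: in A's calls (curr <= prev) the exponent is >= 0, exact
def get_new_val (prev curr : Int) : Int × Int :=
  let l_prev := num_length prev
  let l_curr := num_length curr
  let first_n_digits_prev := get_first_n_dig prev l_curr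
  if first_n_digits_prev < curr then
    (curr * 10 ^ (l_prev - l_curr).toNat, l_prev - l_curr)
  else if first_n_digits_prev = curr ∧
      get_first_n_dig (prev + 1) l_curr = first_n_digits_prev then
    (prev + 1, l_prev - l_curr)
  else
    -- A's final elif condition is exhaustive given the first two branches; ported as else
    (curr * 10 ^ (l_prev - l_curr + 1).toNat, l_prev - l_curr + 1)

def append_sort (num_elements : Int) (arr : List Int) : Int :=
  ((PySem.List.pyRange 1 num_elements 1).foldl
    (fun (s : List Int × Int) i =>
      match PySem.List.pyGet? s.1 (i - 1), PySem.List.pyGet? s.1 i with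
      | some prev, some curr =>
          if curr ≤ prev then
            let r := get_new_val prev curr
            (s.1.set i.toNat r.1, s.2 + r.2)
          else s
      | _, _ => s   -- IndexError in Python; excluded by Pre_append_sort
    ) (arr, 0)).2

-- ===== PORT B =====
-- B's _digits while loop ported with fuel making it structural: n // 10 shrinks n each step,
-- so n.toNat + 1 steps always suffice and the port is exact.
def pvDigitsLoop (fuel : Nat) (n : Int) (ds : List Int) : Int × List Int :=
  match fuel with
  | 0 => (n, ds)
  | f + 1 =>
    if 10 ≤ n then pvDigitsLoop f (PySem.Int.floordiv n 10) (ds ++ [PySem.Int.mod n 10])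
    else (n, ds)

-- _digits: ds collects remainders, the final leading chunk is appended, then the list is reversed
def pvDigits (n : Int) : List Int :=
  if n < 10 then [n]
  else
    let p := pvDigitsLoop (n.toNat + 1) n []
    (p.2 ++ [p.1]).reverse

-- _value: v = 0; for d in ds: v = v * 10 + d
def pvValue (ds : List Int) : Int := ds.foldl (fun v d => v * 10 + d) 0

-- Python's list '<' on int lists: first differing element decides; a proper prefix is smaller
def pvListLt : List Int → List Int → Bool
  | _, [] => false
  | [], _ :: _ => true
  | a :: as_, b :: bs => if a = b then pvListLt as_ bs else decide (a < b)

-- the branch block of B's loop body; dp[:l] / dp[l:] with l = len(dc) ≥ 0 are exactly take/drop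
def pvStep (prev curr : Int) : Int × Int :=
  let dp := pvDigits prev
  let dc := pvDigits curr
  let l := dc.length
  let head := dp.take l
  let tail := dp.drop l
  if pvListLt head dc then
    (pvValue (dc ++ List.replicate tail.length 0), (tail.length : Int))
  else if head = dc ∧ tail.any (fun d => decide (d ≠ 9)) then
    (prev + 1, (tail.length : Int))
  else
    (pvValue (dc ++ List.replicate (tail.length + 1) 0), (tail.length : Int) + 1)

def append_sort_alt (num_elements : Int) (arr : List Int) : Int :=
  ((PySem.List.pyRange 1 num_elements 1).foldl
    (fun (s : List Int × Int) i =>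
      match PySem.List.pyGet? s.1 (i - 1) with
      | none => s   -- IndexError in Python; excluded by Pre_append_sort
      | some prev =>
        match PySem.List.pyGet? s.1 i with
        | none => s   -- IndexError in Python; excluded by Pre_append_sort
        | some curr =>
          if curr ≤ prev then
            let r := pvStep prev curr
            (s.1.set i.toNat r.1, s.2 + r.2)
          else s
    ) (arr, 0)).2

-- ===== PRECONDITION & SPEC =====
-- Pre_ excludes exactly the inputs where Python A raises IndexError: the loop reads arr[i] for
-- i up to num_elements - 1, which fails iff num_elements exceeds len(arr) (and the loop is run).
def Pre_append_sort (num_elements : Int) (arr : List Int) : Prop :=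
  num_elements ≤ (arr.length : Int) ∨ num_elements ≤ 1
instance (num_elements : Int) (arr : List Int) : Decidable (Pre_append_sort num_elements arr) := by
  unfold Pre_append_sort; infer_instance

def pvWitness_append_sort : Int × List Int := (4, [5, 3, 100, 10])

def Spec_append_sort (num_elements : Int) (arr : List Int) (out : Int) : Prop := out = append_sort_alt num_elements arr
instance (num_elements : Int) (arr : List Int) (out : Int) : Decidable (Spec_append_sort num_elements arr out) := by unfold Spec_append_sort; infer_instance

-- ===== CLAIM (what is proved, stated in full; the proofs are below) =====
def Claim_equal_append_sort : Prop := ∀ (num_elements : Int) (arr : List Int), Dom_append_sort num_elements arr → Pre_append_sort num_elements arr → Spec_append_sort num_elements arr (append_sort num_elements arr)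

-- ===== LEMMAS AND PROOFS =====

-- A common arithmetic reference point for both per-pair computations (proof-only helper)
def ivStep (prev curr : Int) : Int × Int :=
  let pad := num_length prev - num_length curr
  let lo := curr * 10 ^ pad.toNat
  if lo > prev then (lo, pad)
  else if prev + 1 < lo + 10 ^ pad.toNat then (prev + 1, pad)
  else (curr * 10 ^ (pad + 1).toNat, pad + 1)

-- the loop result does not depend on the fuel, as long as there is enough of it
theorem nl_fuel : ∀ (f g : Nat) (x c : Int), x.toNat < f → x.toNat < g →
    num_length_loop f x c = num_length_loop g x c
  | 0, _, _, _, hf, _ => absurd hf (by omega)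
  | _ + 1, 0, _, _, _, hg => absurd hg (by omega)
  | f + 1, g + 1, x, c, hf, hg => by
    simp only [num_length_loop]
    by_cases h : 10 ≤ x
    · rw [if_pos h, if_pos h]
      have hd := PySem.Int.floordiv_eq_ediv_of_pos (b := 10) (a := x) (by norm_num)
      exact nl_fuel f g (PySem.Int.floordiv x 10) (c + 1) (by rw [hd]; omega) (by rw [hd]; omega)
    · rw [if_neg h, if_neg h]

-- one unfolding of the loop, with the standard fuel restored on the recursive call
theorem nl_unfold (x c : Int) :
    num_length_loop (x.toNat + 1) x c =
      if 10 ≤ x then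
        num_length_loop ((PySem.Int.floordiv x 10).toNat + 1) (PySem.Int.floordiv x 10) (c + 1)
      else c := by
  simp only [num_length_loop]
  by_cases h : 10 ≤ x
  · rw [if_pos h, if_pos h]
    have hd := PySem.Int.floordiv_eq_ediv_of_pos (b := 10) (a := x) (by norm_num)
    exact nl_fuel x.toNat ((PySem.Int.floordiv x 10).toNat + 1) (PySem.Int.floordiv x 10)
      (c + 1) (by rw [hd]; omega) (by omega)
  · rw [if_neg h, if_neg h]

-- the loop only shifts its accumulator
theorem nl_shift : ∀ (f : Nat) (x c : Int), num_length_loop f x c = num_length_loop f x 0 + c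
  | 0, x, c => by simp [num_length_loop]
  | f + 1, x, c => by
    simp only [num_length_loop]
    by_cases h : 10 ≤ x
    · rw [if_pos h, if_pos h, nl_shift f _ (c + 1), nl_shift f _ (0 + 1)]
      ring
    · rw [if_neg h, if_neg h]
      ring

theorem nl_small {x : Int} (h : x < 10) : num_length x = 1 := by
  rw [num_length, nl_unfold, if_neg (by omega)]

theorem nl_rec {x : Int} (h : 10 ≤ x) :
    num_length x = num_length (PySem.Int.floordiv x 10) + 1 := by
  rw [num_length, num_length, nl_unfold, if_pos h,
    nl_shift _ _ (1 + 1), nl_shift _ _ 1]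
  ring

theorem nl_pos (x : Int) : 1 ≤ num_length x := by
  by_cases h : 10 ≤ x
  · rw [nl_rec h]
    have := nl_pos (PySem.Int.floordiv x 10)
    omega
  · rw [nl_small (by omega)]
termination_by x.toNat
decreasing_by
  all_goals (rw [PySem.Int.floordiv_eq_ediv_of_pos (by norm_num : (0:Int) < 10)]; omega)

theorem nl_ub (x : Int) : x < 10 ^ (num_length x).toNat := by
  by_cases h : 10 ≤ x
  · have hd := PySem.Int.floordiv_eq_ediv_of_pos (b := 10) (a := x) (by norm_num)
    have hk := nl_pos (PySem.Int.floordiv x 10)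
    have IH := nl_ub (PySem.Int.floordiv x 10)
    rw [nl_rec h, show (num_length (PySem.Int.floordiv x 10) + 1).toNat
        = (num_length (PySem.Int.floordiv x 10)).toNat + 1 from by omega, pow_succ]
    rw [hd] at IH ⊢
    omega
  · rw [nl_small (by omega)]
    norm_num
    omega
termination_by x.toNat
decreasing_by
  all_goals (rw [PySem.Int.floordiv_eq_ediv_of_pos (by norm_num : (0:Int) < 10)]; omega)

theorem nl_lb {x : Int} (h : 1 ≤ x) : 10 ^ (num_length x - 1).toNat ≤ x := by
  by_cases h10 : 10 ≤ x
  · have hd := PySem.Int.floordiv_eq_ediv_of_pos (b := 10) (a := x) (by norm_num)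
    have hk := nl_pos (PySem.Int.floordiv x 10)
    have IH := nl_lb (x := PySem.Int.floordiv x 10) (by rw [hd]; omega)
    rw [nl_rec h10, show (num_length (PySem.Int.floordiv x 10) + 1 - 1).toNat
        = (num_length (PySem.Int.floordiv x 10) - 1).toNat + 1 from by omega, pow_succ]
    rw [hd] at IH ⊢
    omega
  · rw [nl_small (by omega)]
    norm_num
    omega
termination_by x.toNat
decreasing_by
  all_goals (rw [PySem.Int.floordiv_eq_ediv_of_pos (by norm_num : (0:Int) < 10)]; omega)

theorem nl_le_of_lt_pow {x d : Int} (hd : 1 ≤ d) (h : x < 10 ^ d.toNat) :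
    num_length x ≤ d := by
  by_contra hc
  have h1 : 1 ≤ x := by
    by_contra hx
    rw [nl_small (by omega)] at hc
    omega
  have hlb := nl_lb h1
  have hmono : (10:Int) ^ d.toNat ≤ 10 ^ (num_length x - 1).toNat :=
    pow_le_pow_right₀ (by norm_num) (by omega)
  omega

theorem nl_mono {a b : Int} (hab : a ≤ b) : num_length a ≤ num_length b := by
  exact nl_le_of_lt_pow (nl_pos b) (lt_of_le_of_lt hab (nl_ub b))

theorem gfnd_spec : ∀ (f : Nat) (x n : Int), 1 ≤ n → x.toNat < f →
    get_first_n_dig_loop f x n = PySem.Int.floordiv x (10 ^ (num_length x - n).toNat)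
  | 0, _, _, _, hf => absurd hf (by omega)
  | f + 1, x, n, hn, hf => by
    have hpow1 : (10:Int) ≤ 10 ^ n.toNat := by
      calc (10:Int) = 10 ^ 1 := by norm_num
      _ ≤ 10 ^ n.toNat := pow_le_pow_right₀ (by norm_num) (by omega)
    simp only [get_first_n_dig_loop]
    by_cases h : 10 ^ n.toNat ≤ x
    · rw [if_pos h]
      have h10 : 10 ≤ x := le_trans hpow1 h
      have hd := PySem.Int.floordiv_eq_ediv_of_pos (b := 10) (a := x) (by norm_num)
      have IH := gfnd_spec f (PySem.Int.floordiv x 10) n hn (by rw [hd]; omega)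
      rw [IH, nl_rec h10]
      have hub := nl_ub x
      have hgt : n < num_length (PySem.Int.floordiv x 10) + 1 := by
        by_contra hc
        have : (10:Int) ^ (num_length x).toNat ≤ 10 ^ n.toNat :=
          pow_le_pow_right₀ (by norm_num) (by rw [nl_rec h10]; have := nl_pos x; omega)
        omega
      rw [show (num_length (PySem.Int.floordiv x 10) + 1 - n).toNat
          = (num_length (PySem.Int.floordiv x 10) - n).toNat + 1 from by omega]
      rw [PySem.Int.floordiv_eq_ediv_of_pos
          (b := 10 ^ ((num_length (PySem.Int.floordiv x 10) - n).toNat + 1)) (by positivity),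
        PySem.Int.floordiv_eq_ediv_of_pos
          (b := 10 ^ (num_length (PySem.Int.floordiv x 10) - n).toNat) (by positivity), hd]
      rw [Int.ediv_ediv_of_nonneg (by norm_num), ← pow_succ']
    · rw [if_neg h]
      have hle : num_length x ≤ n := nl_le_of_lt_pow hn (by omega)
      rw [show (num_length x - n).toNat = 0 from by omega]
      rw [PySem.Int.floordiv_eq_ediv_of_pos (by norm_num : (0:Int) < 10 ^ 0)]
      norm_num

theorem gfnd_eq {x n : Int} (hn : 1 ≤ n) :
    get_first_n_dig x n = PySem.Int.floordiv x (10 ^ (num_length x - n).toNat) :=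
  gfnd_spec (x.toNat + 1) x n hn (by omega)

-- ===== A's step equals the arithmetic reference step =====
theorem A_step (prev curr : Int) (h : curr ≤ prev) :
    get_new_val prev curr = ivStep prev curr := by
  simp only [get_new_val, ivStep, gt_iff_lt]
  have hlc := nl_pos curr
  have hlp := nl_pos prev
  have hmono : num_length curr ≤ num_length prev := nl_mono h
  set lc := num_length curr with hlc_def
  set lp := num_length prev with hlp_def
  set P : Int := 10 ^ (lp - lc).toNat with hP_def
  have hPpos : 0 < P := by positivity
  by_cases hneg : prev < 0
  · -- both sides take their last branch
    have e1 : lc = 1 := by rw [hlc_def, nl_small (by omega)]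
    have e2 : lp = 1 := by rw [hlp_def, nl_small (by omega)]
    have hz : (lp - lc).toNat = 0 := by omega
    have g1 : get_first_n_dig prev lc = prev := by
      rw [gfnd_eq (by omega), hz, pow_zero,
        PySem.Int.floordiv_eq_ediv_of_pos (by norm_num), Int.ediv_one]
    have g2 : get_first_n_dig (prev + 1) lc = prev + 1 := by
      rw [gfnd_eq (by omega), nl_small (show prev + 1 < 10 from by omega), e1,
        show ((1:Int) - 1).toNat = 0 from rfl, pow_zero,
        PySem.Int.floordiv_eq_ediv_of_pos (by norm_num), Int.ediv_one]
    have hPe : P = 1 := by rw [hP_def, hz]; norm_num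
    rw [g1, if_neg (by omega), if_neg (by rintro ⟨h1, h2⟩; rw [g2] at h2; omega),
      if_neg (by rw [hPe]; omega), if_neg (by rw [hPe]; omega)]
  · rw [not_lt] at hneg
    have hfirst : get_first_n_dig prev lc = PySem.Int.floordiv prev P :=
      gfnd_eq (by omega)
    have hub_c : curr < 10 ^ lc.toNat := nl_ub curr
    have hub_p : prev < 10 ^ lp.toNat := nl_ub prev
    have h10 : 10 ^ lc.toNat * P = 10 ^ lp.toNat := by
      rw [hP_def, ← pow_add]
      congr 1
      omega
    rw [hfirst]
    by_cases hb1 : prev < curr * P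
    · rw [if_pos (by rw [PySem.Int.floordiv_lt_iff_lt_mul hPpos]; exact hb1),
        if_pos hb1]
    · rw [not_lt] at hb1
      rw [if_neg (by rw [PySem.Int.floordiv_lt_iff_lt_mul hPpos]; exact not_lt.mpr hb1),
        if_neg (not_lt.mpr hb1)]
      by_cases hb2 : prev + 1 < curr * P + P
      · -- A's middle branch fires: prev's first digits are curr, and prev+1 keeps them
        have hf : PySem.Int.floordiv prev P = curr := by
          rw [PySem.Int.floordiv_eq_iff_of_pos hPpos]
          have : (curr + 1) * P = curr * P + P := by ring
          exact ⟨hb1, by linarith⟩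
        have hnl1 : num_length (prev + 1) = lp := by
          apply le_antisymm
          · apply nl_le_of_lt_pow (by omega)
            rw [show lp.toNat = lc.toNat + (lp - lc).toNat from by omega, pow_add, ← hP_def]
            have hcP : (curr + 1) * P ≤ 10 ^ lc.toNat * P :=
              mul_le_mul_of_nonneg_right (by omega) (by omega)
            have : (curr + 1) * P = curr * P + P := by ring
            linarith
          · rw [hlp_def]; exact nl_mono (by omega)
        have hfp : PySem.Int.floordiv (prev + 1) P = curr := by
          rw [PySem.Int.floordiv_eq_iff_of_pos hPpos]
          have : (curr + 1) * P = curr * P + P := by ring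
          exact ⟨by linarith, by linarith⟩
        have hcond : PySem.Int.floordiv prev P = curr ∧
            get_first_n_dig (prev + 1) lc = PySem.Int.floordiv prev P :=
          ⟨hf, by rw [gfnd_eq (by omega), hnl1, ← hP_def, hfp, hf]⟩
        rw [if_pos hcond, if_pos hb2]
      · -- both sides take their last branch
        rw [not_lt] at hb2
        rw [if_neg (not_lt.mpr hb2)]
        rw [if_neg ?_]
        rintro ⟨hf, hg⟩
        have hbr := (PySem.Int.floordiv_eq_iff_of_pos hPpos).mp hf
        have hcnn : 0 ≤ curr := by
          rw [← hf, PySem.Int.floordiv_eq_ediv_of_pos hPpos]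
          exact Int.ediv_nonneg hneg (by omega)
        have hexp : (curr + 1) * P = curr * P + P := by ring
        have heq : prev + 1 = (curr + 1) * P := by linarith [hbr.1, hbr.2]
        by_cases hc1 : curr + 1 < 10 ^ lc.toNat
        · have hnl1 : num_length (prev + 1) = lp := by
            apply le_antisymm
            · apply nl_le_of_lt_pow (by omega)
              rw [show lp.toNat = lc.toNat + (lp - lc).toNat from by omega, pow_add, ← hP_def]
              have : (curr + 1) * P < 10 ^ lc.toNat * P :=
                mul_lt_mul_of_pos_right hc1 hPpos
              linarith
            · rw [hlp_def]; exact nl_mono (by omega)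
          have hfp : PySem.Int.floordiv (prev + 1) P = curr + 1 := by
            rw [PySem.Int.floordiv_eq_iff_of_pos hPpos, heq]
            have : (curr + 1 + 1) * P = (curr + 1) * P + P := by ring
            exact ⟨le_rfl, by linarith⟩
          rw [gfnd_eq (by omega), hnl1, ← hP_def, hfp, hf] at hg
          omega
        · have hc2 : curr + 1 = 10 ^ lc.toNat := by omega
          have hpow : prev + 1 = 10 ^ lp.toNat := by rw [heq, hc2, h10]
          have hnl1 : num_length (prev + 1) = lp + 1 := by
            apply le_antisymm
            · apply nl_le_of_lt_pow (by omega)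
              rw [show (lp + 1).toNat = lp.toNat + 1 from by omega, pow_succ, hpow]
              nlinarith [pow_pos (by norm_num : (0:Int) < 10) lp.toNat]
            · by_contra hcon
              have hm : (10:Int) ^ (num_length (prev + 1)).toNat ≤ 10 ^ lp.toNat :=
                pow_le_pow_right₀ (by norm_num) (by have := nl_pos (prev + 1); omega)
              have := nl_ub (prev + 1)
              omega
          have hfp : PySem.Int.floordiv (prev + 1) (10 ^ (lp + 1 - lc).toNat)
              = 10 ^ (lc - 1).toNat := by
            rw [PySem.Int.floordiv_eq_iff_of_pos (by positivity), hpow]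
            constructor
            · rw [← pow_add]
              apply pow_le_pow_right₀ (by norm_num)
              omega
            · rw [add_mul, one_mul, ← pow_add,
                show (lc - 1).toNat + (lp + 1 - lc).toNat = lp.toNat from by omega]
              have := pow_pos (by norm_num : (0:Int) < 10) (lp + 1 - lc).toNat
              linarith
          rw [gfnd_eq (by omega), hnl1, hfp, hf] at hg
          have hsucc : (10:Int) ^ lc.toNat = 10 * 10 ^ (lc - 1).toNat := by
            rw [← pow_succ']
            congr 1
            omega
          have : (1:Int) ≤ 10 ^ (lc - 1).toNat := one_le_pow₀ (by norm_num)
          omega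

-- ===== digit-list lemmas for B =====

theorem dloop_fuel : ∀ (f g : Nat) (n : Int) (ds : List Int), n.toNat < f → n.toNat < g →
    pvDigitsLoop f n ds = pvDigitsLoop g n ds
  | 0, _, _, _, hf, _ => absurd hf (by omega)
  | _ + 1, 0, _, _, _, hg => absurd hg (by omega)
  | f + 1, g + 1, n, ds, hf, hg => by
    simp only [pvDigitsLoop]
    by_cases h : 10 ≤ n
    · rw [if_pos h, if_pos h]
      have hd := PySem.Int.floordiv_eq_ediv_of_pos (b := 10) (a := n) (by norm_num)
      exact dloop_fuel f g _ _ (by rw [hd]; omega) (by rw [hd]; omega)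
    · rw [if_neg h, if_neg h]

theorem dloop_shift : ∀ (f : Nat) (n : Int) (ds : List Int),
    pvDigitsLoop f n ds = ((pvDigitsLoop f n []).1, ds ++ (pvDigitsLoop f n []).2)
  | 0, n, ds => by simp [pvDigitsLoop]
  | f + 1, n, ds => by
    simp only [pvDigitsLoop]
    by_cases h : 10 ≤ n
    · rw [if_pos h, if_pos h, dloop_shift f _ (ds ++ [PySem.Int.mod n 10]),
        dloop_shift f _ ([] ++ [PySem.Int.mod n 10])]
      simp
    · rw [if_neg h, if_neg h]
      simp

theorem pvDigits_eq_loop (n : Int) :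
    pvDigits n = ((pvDigitsLoop (n.toNat + 1) n []).2 ++ [(pvDigitsLoop (n.toNat + 1) n []).1]).reverse := by
  by_cases h : n < 10
  · rw [pvDigits, if_pos h]
    rw [show pvDigitsLoop (n.toNat + 1) n [] = (n, []) from by
      simp only [pvDigitsLoop]; rw [if_neg (by omega)]]
    simp
  · rw [pvDigits, if_neg h]

theorem digits_small {n : Int} (h : n < 10) : pvDigits n = [n] := by
  rw [pvDigits, if_pos h]

theorem digits_rec {n : Int} (h : 10 ≤ n) :
    pvDigits n = pvDigits (PySem.Int.floordiv n 10) ++ [PySem.Int.mod n 10] := by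
  have hd := PySem.Int.floordiv_eq_ediv_of_pos (b := 10) (a := n) (by norm_num)
  have hq : (PySem.Int.floordiv n 10).toNat < n.toNat := by rw [hd]; omega
  rw [pvDigits_eq_loop n]
  rw [show pvDigitsLoop (n.toNat + 1) n []
      = pvDigitsLoop n.toNat (PySem.Int.floordiv n 10) ([] ++ [PySem.Int.mod n 10]) from by
    simp only [pvDigitsLoop]; rw [if_pos h]]
  rw [List.nil_append,
    dloop_shift n.toNat (PySem.Int.floordiv n 10) [PySem.Int.mod n 10],
    dloop_fuel n.toNat ((PySem.Int.floordiv n 10).toNat + 1) (PySem.Int.floordiv n 10) []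
      hq (by omega)]
  rw [pvDigits_eq_loop (PySem.Int.floordiv n 10)]
  simp

theorem digits_len (n : Int) : (pvDigits n).length = (num_length n).toNat := by
  by_cases h : 10 ≤ n
  · have hd := PySem.Int.floordiv_eq_ediv_of_pos (b := 10) (a := n) (by norm_num)
    have IH := digits_len (PySem.Int.floordiv n 10)
    have hp := nl_pos (PySem.Int.floordiv n 10)
    rw [digits_rec h, nl_rec h, List.length_append, IH]
    simp only [List.length_cons, List.length_nil]
    omega
  · rw [digits_small (by omega), nl_small (by omega)]
    rfl
termination_by n.toNat
decreasing_by
  all_goals (rw [PySem.Int.floordiv_eq_ediv_of_pos (by norm_num : (0:Int) < 10)]; omega)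

theorem val_append_singleton (ds : List Int) (d : Int) :
    pvValue (ds ++ [d]) = pvValue ds * 10 + d := by
  simp [pvValue, List.foldl_append]

theorem digits_val (n : Int) : pvValue (pvDigits n) = n := by
  by_cases h : 10 ≤ n
  · have IH := digits_val (PySem.Int.floordiv n 10)
    rw [digits_rec h, val_append_singleton, IH, PySem.Int.floordiv_mul_add_mod n 10]
  · rw [digits_small (by omega)]
    simp [pvValue]
termination_by n.toNat
decreasing_by
  all_goals (rw [PySem.Int.floordiv_eq_ediv_of_pos (by norm_num : (0:Int) < 10)]; omega)

theorem digits_bounds {n : Int} (hn : 0 ≤ n) : ∀ d ∈ pvDigits n, 0 ≤ d ∧ d ≤ 9 := by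
  by_cases h : 10 ≤ n
  · have hd := PySem.Int.floordiv_eq_ediv_of_pos (b := 10) (a := n) (by norm_num)
    have IH := digits_bounds (n := PySem.Int.floordiv n 10)
      (by rw [hd]; exact Int.ediv_nonneg hn (by norm_num))
    have hm1 := PySem.Int.mod_nonneg n (b := 10) (by norm_num)
    have hm2 := PySem.Int.mod_lt n (b := 10) (by norm_num)
    rw [digits_rec h]
    intro d hdm
    rcases List.mem_append.mp hdm with h1 | h1
    · exact IH d h1
    · rcases List.mem_singleton.mp h1 with rfl
      omega
  · rw [digits_small (by omega)]
    intro d hdm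
    rcases List.mem_singleton.mp hdm with rfl
    omega
termination_by n.toNat
decreasing_by
  all_goals (rw [PySem.Int.floordiv_eq_ediv_of_pos (by norm_num : (0:Int) < 10)]; omega)

theorem val_aux : ∀ (ds : List Int) (v : Int),
    ds.foldl (fun v d => v * 10 + d) v = v * 10 ^ ds.length + pvValue ds
  | [], v => by simp [pvValue]
  | d :: ds, v => by
    have h1 := val_aux ds (v * 10 + d)
    have h2 := val_aux ds (0 * 10 + d)
    simp only [List.foldl, pvValue] at *
    rw [h1, h2]
    simp [pow_succ]
    ring

theorem val_cons (d : Int) (ds : List Int) :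
    pvValue (d :: ds) = d * 10 ^ ds.length + pvValue ds := by
  have := val_aux ds (0 * 10 + d)
  simp only [pvValue, List.foldl] at *
  rw [this]
  ring

theorem val_append (u w : List Int) :
    pvValue (u ++ w) = pvValue u * 10 ^ w.length + pvValue w := by
  have := val_aux w (pvValue u)
  simp only [pvValue, List.foldl_append] at *
  exact this

theorem val_replicate_zero : ∀ (k : Nat), pvValue (List.replicate k 0) = 0
  | 0 => rfl
  | k + 1 => by
    rw [List.replicate_succ, val_cons, val_replicate_zero k]
    ring

theorem val_bounds : ∀ (ds : List Int), (∀ d ∈ ds, 0 ≤ d ∧ d ≤ 9) →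
    0 ≤ pvValue ds ∧ pvValue ds < 10 ^ ds.length
  | [], _ => by simp [pvValue]
  | d :: ds, hb => by
    have IH := val_bounds ds (fun x hx => hb x (List.mem_cons_of_mem _ hx))
    have hd := hb d List.mem_cons_self
    rw [val_cons]
    have hP : (0:Int) < 10 ^ ds.length := by positivity
    constructor
    · nlinarith [hd.1, IH.1]
    · have : d * 10 ^ ds.length ≤ 9 * 10 ^ ds.length :=
        mul_le_mul_of_nonneg_right hd.2 (le_of_lt hP)
      calc d * 10 ^ ds.length + pvValue ds < d * 10 ^ ds.length + 10 ^ ds.length := by omega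
      _ ≤ 9 * 10 ^ ds.length + 10 ^ ds.length := by omega
      _ = 10 ^ (d :: ds).length := by rw [List.length_cons, pow_succ]; ring

theorem lex_val : ∀ (u v : List Int), u.length = v.length →
    (∀ d ∈ u, 0 ≤ d ∧ d ≤ 9) → (∀ d ∈ v, 0 ≤ d ∧ d ≤ 9) →
    (pvListLt u v = true ↔ pvValue u < pvValue v)
  | [], [], _, _, _ => by simp [pvListLt]
  | [], _ :: _, hlen, _, _ => by simp at hlen
  | _ :: _, [], hlen, _, _ => by simp at hlen
  | a :: us, b :: vs, hlen, hu, hv => by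
    have hlen' : us.length = vs.length := by simpa using hlen
    have IH := lex_val us vs hlen'
      (fun x hx => hu x (List.mem_cons_of_mem _ hx))
      (fun x hx => hv x (List.mem_cons_of_mem _ hx))
    have hbu := val_bounds us (fun x hx => hu x (List.mem_cons_of_mem _ hx))
    have hbv := val_bounds vs (fun x hx => hv x (List.mem_cons_of_mem _ hx))
    have ha := hu a List.mem_cons_self
    have hb := hv b List.mem_cons_self
    rw [val_cons, val_cons, hlen']
    simp only [pvListLt]
    by_cases hab : a = b
    · rw [if_pos hab, hab, IH]
      omega
    · rw [if_neg hab]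
      have hP : (0:Int) < 10 ^ vs.length := by positivity
      rw [hlen'] at hbu
      constructor
      · intro hlt
        have hab' : a < b := by simpa using hlt
        have : (a + 1) * 10 ^ vs.length ≤ b * 10 ^ vs.length :=
          mul_le_mul_of_nonneg_right (by omega) (le_of_lt hP)
        linarith [hbu.2, hbv.1]
      · intro hval
        by_contra hlt
        have hab' : b < a := by
          simp at hlt
          omega
        have : (b + 1) * 10 ^ vs.length ≤ a * 10 ^ vs.length :=
          mul_le_mul_of_nonneg_right (by omega) (le_of_lt hP)
        linarith [hbv.2, hbu.1]

theorem lex_eq_of_not : ∀ (u v : List Int), u.length = v.length →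
    pvListLt u v = false → pvListLt v u = false → u = v
  | [], [], _, _, _ => rfl
  | [], _ :: _, hlen, _, _ => by simp at hlen
  | _ :: _, [], hlen, _, _ => by simp at hlen
  | a :: us, b :: vs, hlen, h1, h2 => by
    have hlen' : us.length = vs.length := by simpa using hlen
    simp only [pvListLt] at h1 h2
    by_cases hab : a = b
    · rw [if_pos hab] at h1
      rw [if_pos hab.symm] at h2
      rw [hab, lex_eq_of_not us vs hlen' h1 h2]
    · rw [if_neg hab] at h1
      rw [if_neg (fun hh => hab hh.symm)] at h2
      simp at h1 h2
      omega

theorem all9_val : ∀ (ds : List Int), (∀ d ∈ ds, 0 ≤ d ∧ d ≤ 9) →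
    ((ds.any (fun d => decide (d ≠ 9))) = false ↔ pvValue ds = 10 ^ ds.length - 1)
  | [], _ => by simp [pvValue]
  | d :: ds, hb => by
    have IH := all9_val ds (fun x hx => hb x (List.mem_cons_of_mem _ hx))
    have hd := hb d List.mem_cons_self
    have hv := val_bounds ds (fun x hx => hb x (List.mem_cons_of_mem _ hx))
    have hP : (0:Int) < 10 ^ ds.length := by positivity
    rw [val_cons, List.length_cons, pow_succ]
    simp only [List.any_cons, Bool.or_eq_false_iff, decide_eq_false_iff_not, not_not]
    constructor
    · rintro ⟨rfl, h9⟩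
      rw [IH.mp h9]
      ring
    · intro hval
      have hd9 : d = 9 := by nlinarith [hd.1, hd.2, hv.1, hv.2]
      refine ⟨hd9, IH.mpr ?_⟩
      rw [hd9] at hval
      omega

-- ===== B's step equals the arithmetic reference step =====
theorem B_step (prev curr : Int) (h : curr ≤ prev) :
    pvStep prev curr = ivStep prev curr := by
  have hlc := nl_pos curr
  have hlp := nl_pos prev
  have hmono : num_length curr ≤ num_length prev := nl_mono h
  by_cases hneg : prev < 0
  · -- every value is a single "digit": both sides take their last branch
    have dp1 : pvDigits prev = [prev] := digits_small (by omega)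
    have dc1 : pvDigits curr = [curr] := digits_small (by omega)
    have e1 : num_length curr = 1 := nl_small (by omega)
    have e2 : num_length prev = 1 := nl_small (by omega)
    have hlt1 : pvListLt [prev] [curr] = false := by
      simp only [pvListLt]
      by_cases hpc : prev = curr
      · rw [if_pos hpc]
      · rw [if_neg hpc]
        simp
        omega
    simp only [pvStep, ivStep, dp1, dc1, e1, e2, List.length_cons, List.length_nil,
      List.take_succ_cons, List.take_nil, List.drop_succ_cons, List.drop_nil, hlt1,
      Bool.false_eq_true, if_false, List.any_nil, and_false, gt_iff_lt]
    rw [if_neg (by simp; omega), if_neg (by simp; omega)]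
    simp [pvValue]
  · rw [not_lt] at hneg
    obtain ⟨dp, hdp⟩ : ∃ x, pvDigits prev = x := ⟨_, rfl⟩
    obtain ⟨dc, hdc⟩ : ∃ x, pvDigits curr = x := ⟨_, rfl⟩
    have hdpb : ∀ d ∈ dp, 0 ≤ d ∧ d ≤ 9 := hdp ▸ digits_bounds hneg
    have hlen_p : dp.length = (num_length prev).toNat := hdp ▸ digits_len prev
    have hlen_c : dc.length = (num_length curr).toNat := hdc ▸ digits_len curr
    have hvp : pvValue dp = prev := hdp ▸ digits_val prev
    have hvcval : pvValue dc = curr := hdc ▸ digits_val curr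
    have hl_le : dc.length ≤ dp.length := by omega
    have htlen : (dp.drop dc.length).length = dp.length - dc.length := by
      rw [List.length_drop]
    have hhead_len : (dp.take dc.length).length = dc.length := by
      rw [List.length_take]
      omega
    have hheadb : ∀ d ∈ dp.take dc.length, 0 ≤ d ∧ d ≤ 9 :=
      fun d hd => hdpb d (List.mem_of_mem_take hd)
    have htailb : ∀ d ∈ dp.drop dc.length, 0 ≤ d ∧ d ≤ 9 :=
      fun d hd => hdpb d (List.mem_of_mem_drop hd)
    have htail_bounds := val_bounds (dp.drop dc.length) htailb
    rw [htlen] at htail_bounds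
    have hval_split : pvValue (dp.take dc.length) * 10 ^ (dp.length - dc.length)
        + pvValue (dp.drop dc.length) = prev := by
      have hv := val_append (dp.take dc.length) (dp.drop dc.length)
      rw [List.take_append_drop, htlen, hvp] at hv
      omega
    have hpad : (num_length prev - num_length curr).toNat = dp.length - dc.length := by
      omega
    have hto : ((dp.length - dc.length : Nat) : Int) = num_length prev - num_length curr := by
      omega
    have hto1 : (num_length prev - num_length curr + 1).toNat = dp.length - dc.length + 1 := by
      omega
    have hPpos : (0:Int) < 10 ^ (dp.length - dc.length) := by positivity
    have hvlo : pvValue (dc ++ List.replicate (dp.drop dc.length).length 0)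
        = curr * 10 ^ (dp.length - dc.length) := by
      rw [val_append, val_replicate_zero, List.length_replicate, hvcval, htlen]
      ring
    have hvlo1 : pvValue (dc ++ List.replicate ((dp.drop dc.length).length + 1) 0)
        = curr * 10 ^ (dp.length - dc.length + 1) := by
      rw [val_append, val_replicate_zero, List.length_replicate, hvcval, htlen]
      ring
    simp only [pvStep, ivStep, hdp, hdc, gt_iff_lt, hpad, hto1]
    by_cases hcneg : curr < 0
    · -- dc is the singleton [curr]; head is a nonnegative digit, so both tests fail
      have dc1 : dc = [curr] := hdc.symm.trans (digits_small (by omega))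
      obtain ⟨a, ha⟩ := List.length_eq_one_iff.mp
        (by rw [hhead_len, dc1]; rfl : (dp.take dc.length).length = 1)
      have hann : 0 ≤ a := by
        have := hheadb a (by rw [ha]; exact List.mem_singleton.mpr rfl)
        omega
      rw [if_neg (by
        rw [ha, dc1]
        simp only [pvListLt]
        by_cases hac : a = curr
        · rw [if_pos hac]; simp
        · rw [if_neg hac]; simp; omega)]
      rw [if_neg (by
        rintro ⟨h1, -⟩
        rw [ha, dc1] at h1
        have : a = curr := by simpa using h1
        omega)]
      rw [if_neg (by
        have h1 : (1:Int) ≤ 10 ^ (dp.length - dc.length) := one_le_pow₀ (by norm_num)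
        have : curr * 10 ^ (dp.length - dc.length) ≤ curr := by nlinarith
        omega)]
      rw [if_neg (by
        have hc1 : curr + 1 ≤ 0 := by omega
        have : (curr + 1) * 10 ^ (dp.length - dc.length) ≤ 0 :=
          mul_nonpos_of_nonpos_of_nonneg hc1 (le_of_lt hPpos)
        nlinarith)]
      rw [hvlo1, ← hto, htlen]
    · -- main case: prev ≥ 0, curr ≥ 0
      rw [not_lt] at hcneg
      have hdcb : ∀ d ∈ dc, 0 ≤ d ∧ d ≤ 9 := hdc ▸ digits_bounds hcneg
      have hlex := lex_val (dp.take dc.length) dc (by rw [hhead_len]) hheadb hdcb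
      rw [hvcval] at hlex
      have hheadv := val_bounds (dp.take dc.length) hheadb
      by_cases hb1 : prev < curr * 10 ^ (dp.length - dc.length)
      · -- first branches on both sides
        have hvh : pvValue (dp.take dc.length) < curr := by
          nlinarith [htail_bounds.1, htail_bounds.2]
        rw [if_pos (hlex.mpr hvh), if_pos hb1, hvlo, htlen, hto]
      · rw [not_lt] at hb1
        have hvh_ge : curr ≤ pvValue (dp.take dc.length) := by
          by_contra hc
          have : (pvValue (dp.take dc.length) + 1) * 10 ^ (dp.length - dc.length)
              ≤ curr * 10 ^ (dp.length - dc.length) :=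
            mul_le_mul_of_nonneg_right (by omega) (le_of_lt hPpos)
          nlinarith [htail_bounds.2]
        have hnotlt : pvListLt (dp.take dc.length) dc = false := by
          rw [Bool.eq_false_iff]
          intro hcon
          have := hlex.mp hcon
          omega
        rw [if_neg (by rw [hnotlt]; simp), if_neg (not_lt.mpr hb1)]
        by_cases hb2 : prev + 1 < curr * 10 ^ (dp.length - dc.length)
            + 10 ^ (dp.length - dc.length)
        · -- middle branches on both sides
          have hvh_eq : pvValue (dp.take dc.length) = curr := by
            by_contra hne
            have hgt : curr < pvValue (dp.take dc.length) := by omega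
            have : (curr + 1) * 10 ^ (dp.length - dc.length)
                ≤ pvValue (dp.take dc.length) * 10 ^ (dp.length - dc.length) :=
              mul_le_mul_of_nonneg_right (by omega) (le_of_lt hPpos)
            nlinarith [htail_bounds.1]
          have hhd : dp.take dc.length = dc := by
            apply lex_eq_of_not (dp.take dc.length) dc (by rw [hhead_len]) hnotlt
            rw [Bool.eq_false_iff]
            intro hcon
            have := (lex_val dc (dp.take dc.length) (by rw [hhead_len]) hdcb hheadb).mp hcon
            rw [hvcval] at this
            omega
          have hvt : pvValue (dp.drop dc.length) ≠ 10 ^ (dp.length - dc.length) - 1 := by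
            intro hcon
            rw [hvh_eq] at hval_split
            omega
          have hany : (dp.drop dc.length).any (fun d => decide (d ≠ 9)) = true := by
            rw [← Bool.not_eq_false]
            intro hcon
            have := (all9_val (dp.drop dc.length) htailb).mp hcon
            rw [htlen] at this
            exact hvt this
          rw [if_pos ⟨hhd, hany⟩, if_pos hb2, htlen, hto]
        · -- last branches on both sides
          rw [not_lt] at hb2
          rw [if_neg (by
            rintro ⟨hhd, hany⟩
            have hvh_eq : pvValue (dp.take dc.length) = curr := by rw [hhd, hvcval]
            have hvt : pvValue (dp.drop dc.length) = 10 ^ (dp.length - dc.length) - 1 := by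
              rw [hvh_eq] at hval_split
              omega
            have h9 : (dp.drop dc.length).any (fun d => decide (d ≠ 9)) = false :=
              (all9_val (dp.drop dc.length) htailb).mpr (by rw [htlen]; exact hvt)
            rw [h9] at hany
            exact Bool.false_ne_true hany)]
          rw [if_neg (not_lt.mpr hb2), hvlo1, ← hto, htlen]

-- ===== VERDICT (by name: the statement is the Claim_ definition above) =====
theorem append_sort_spec : Claim_equal_append_sort := by
  intro num_elements arr _ _
  unfold Spec_append_sort append_sort append_sort_alt
  congr 1
  apply PySem.List.foldl_congr_mem
  intro s i _
  cases hp : PySem.List.pyGet? s.1 (i - 1) with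
  | none => rfl
  | some prev =>
    cases hc : PySem.List.pyGet? s.1 i with
    | none => rfl
    | some curr =>
      by_cases hle : curr ≤ prev
      · simp only [hle, if_pos, (A_step prev curr hle).trans (B_step prev curr hle).symm]
      · simp [hle]
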